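-- pv_equiv track=rewrite | github.com/jetsemr/nqueenskings | nkingsverification.py | count_safe_placements
-- ===== SOURCE A (Python) =====
-- def is_safe(kings, row, col):
--     for r, c in kings:
--         if (r == None or c == None):
--           return True
--         if (row == r and abs(col - c) == 1) or (col == c and abs(row - r) == 1) or (abs(row - r) == abs(col - c) and abs(row - r) == 1):
--             return False
--     return True
--
-- def count_safe_placements(kings, spaces):
--     if len(kings) == 26:
--         return 1
--     count = 0
--     for i, (row, col) in enumerate(spaces):
--         if is_safe(kings, row, col):
--             count += count_safe_placements(kings + [(row, col)], spaces[i+1:])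
--     return count
-- ===== SOURCE B (Python) =====
-- def is_safe(kings, row, col):
--     for r, c in kings:
--         if (r == None or c == None):
--           return True
--         if (row == r and abs(col - c) == 1) or (col == c and abs(row - r) == 1) or (abs(row - r) == abs(col - c) and abs(row - r) == 1):
--             return False
--     return True
--
-- def count_safe_placements(kings, spaces):
--     # iterative DFS over an explicit stack of (kings, remaining spaces) frames
--     total = 0
--     stack = [(kings, spaces)]
--     while stack:
--         ks, sp = stack.pop()
--         if len(ks) == 26:
--             total += 1
--         elif sp:
--             (row, col), rest = sp[0], sp[1:]
--             stack.append((ks, rest))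
--             if is_safe(ks, row, col):
--                 stack.append((ks + [(row, col)], rest))
--     return total
-- ===== Notes on version B (the rewrite author's own statement) =====
-- stated objective: alternative
-- what changed: Replaced A's recursive enumerate-loop with an iterative depth-first search over an explicit stack of (kings, remaining-spaces) frames and a running total, branching include/exclude on the head space.
import Mathlib
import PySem

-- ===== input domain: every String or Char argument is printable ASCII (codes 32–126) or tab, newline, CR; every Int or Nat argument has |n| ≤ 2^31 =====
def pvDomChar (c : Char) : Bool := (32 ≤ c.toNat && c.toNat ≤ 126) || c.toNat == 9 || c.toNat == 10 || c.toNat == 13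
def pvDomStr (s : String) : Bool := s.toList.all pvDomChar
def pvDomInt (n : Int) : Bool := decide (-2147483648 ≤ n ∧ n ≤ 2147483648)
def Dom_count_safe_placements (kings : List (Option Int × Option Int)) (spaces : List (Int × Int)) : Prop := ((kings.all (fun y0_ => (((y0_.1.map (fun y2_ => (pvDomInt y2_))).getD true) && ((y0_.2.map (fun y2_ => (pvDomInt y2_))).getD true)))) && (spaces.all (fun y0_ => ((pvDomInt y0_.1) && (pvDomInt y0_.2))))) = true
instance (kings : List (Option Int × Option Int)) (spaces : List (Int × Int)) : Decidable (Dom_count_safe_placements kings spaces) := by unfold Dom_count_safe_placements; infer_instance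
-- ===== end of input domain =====

-- B replaces A's recursive enumerate-loop by an iterative DFS over an explicit
-- stack of (kings, remaining-spaces) frames (alternative decomposition, same cost).


-- ===== PORT A =====
-- shared helper (identical in Source A and Source B): Python's is_safe, including the
-- early `return True` when a king has a None coordinate
def is_safe (kings : List (Option Int × Option Int)) (row col : Int) : Bool :=
  match kings with
  | [] => true
  | (r?, c?) :: rest =>
    match r?, c? with
    | some r, some c =>
      if (row == r && (col - c).natAbs == 1) || (col == c && (row - r).natAbs == 1)
          || ((row - r).natAbs == (col - c).natAbs && (row - r).natAbs == 1)
      then false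
      else is_safe rest row col
    | _, _ => true

-- A's for-loop over enumerate(spaces): each iteration processes the head and
-- recurses with spaces[i+1:], i.e. the rest of the list, accumulating `count`
mutual
def count_safe_placements (kings : List (Option Int × Option Int)) (spaces : List (Int × Int)) : Int :=
  if kings.length == 26 then 1
  else cspLoop kings 0 spaces
  termination_by (spaces.length, 1)

def cspLoop (kings : List (Option Int × Option Int)) (count : Int) (spaces : List (Int × Int)) : Int :=
  match spaces with
  | [] => count
  | (row, col) :: rest =>
    cspLoop kings
      (if is_safe kings row col then
        count + count_safe_placements (kings ++ [(some row, some col)]) rest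
       else count)
      rest
  termination_by (spaces.length, 0)
  decreasing_by all_goals (simp_wf; omega)
end

-- ===== PORT B =====
-- positivity fact cited by stackRun's termination argument
theorem pv_pow3_pos (n : Nat) : 0 < 3 ^ n := Nat.pow_pos (by omega)

-- the while-stack loop of Source B: pop a frame, bump the total or push the
-- exclude-head frame and (if safe) the include-head frame
def stackRun (stack : List (List (Option Int × Option Int) × List (Int × Int))) (total : Int) : Int :=
  match stack with
  | [] => total
  | (ks, sp) :: stk =>
    if ks.length == 26 then stackRun stk (total + 1)
    else
      match sp with
      | [] => stackRun stk total
      | (row, col) :: rest =>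
        if is_safe ks row col then
          stackRun ((ks ++ [(some row, some col)], rest) :: (ks, rest) :: stk) total
        else stackRun ((ks, rest) :: stk) total
termination_by (stack.map (fun f => 3 ^ f.2.length)).sum
decreasing_by
  all_goals simp only [List.map_cons, List.sum_cons, List.length_cons, List.length_nil,
    pow_succ, pow_zero]
  · have := pv_pow3_pos sp.length; omega
  · omega
  · have := pv_pow3_pos rest.length; omega
  · have := pv_pow3_pos rest.length; omega

def count_safe_placements_alt (kings : List (Option Int × Option Int)) (spaces : List (Int × Int)) : Int :=
  stackRun [(kings, spaces)] 0

-- ===== PRECONDITION & SPEC =====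
def Spec_count_safe_placements (kings : List (Option Int × Option Int)) (spaces : List (Int × Int)) (out : Int) : Prop := out = count_safe_placements_alt kings spaces
instance (kings : List (Option Int × Option Int)) (spaces : List (Int × Int)) (out : Int) : Decidable (Spec_count_safe_placements kings spaces out) := by unfold Spec_count_safe_placements; infer_instance

-- ===== CLAIM (what is proved, stated in full; the proofs are below) =====
def Claim_equal_count_safe_placements : Prop := ∀ (kings : List (Option Int × Option Int)) (spaces : List (Int × Int)), Dom_count_safe_placements kings spaces → Spec_count_safe_placements kings spaces (count_safe_placements kings spaces)

-- ===== LEMMAS AND PROOFS =====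

-- proof-side helper: the value contributed by one frame, as a structural recursion
def cspBin (kings : List (Option Int × Option Int)) (spaces : List (Int × Int)) : Int :=
  if kings.length == 26 then 1
  else
    match spaces with
    | [] => 0
    | (row, col) :: rest =>
      (if is_safe kings row col then cspBin (kings ++ [(some row, some col)]) rest else 0)
        + cspBin kings rest
termination_by spaces.length
decreasing_by all_goals simp_wf

theorem cspBin_26 (kings : List (Option Int × Option Int)) (sp : List (Int × Int))
    (h : (kings.length == 26) = true) : cspBin kings sp = 1 := by
  rw [cspBin.eq_def]; simp [h]

theorem cspBin_cons (kings : List (Option Int × Option Int)) (row col : Int)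
    (rest : List (Int × Int)) :
    cspBin kings ((row, col) :: rest)
      = if kings.length == 26 then 1
        else (if is_safe kings row col then cspBin (kings ++ [(some row, some col)]) rest else 0)
          + cspBin kings rest := by
  rw [cspBin.eq_def]

theorem stackRun_eq (stack : List (List (Option Int × Option Int) × List (Int × Int))) (total : Int) :
    stackRun stack total = total + (stack.map (fun f => cspBin f.1 f.2)).sum := by
  fun_induction stackRun stack total with
  | case1 total => simp
  | case2 total ks sp stk h26 ih =>
    rw [ih]
    simp only [List.map_cons, List.sum_cons, cspBin_26 ks sp h26]
    ring
  | case3 total ks stk h26 ih =>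
    rw [ih]
    simp only [List.map_cons, List.sum_cons]
    rw [cspBin.eq_def]
    simp [h26]
  | case4 total ks stk h26 row col rest hs ih =>
    rw [ih]
    simp only [List.map_cons, List.sum_cons, cspBin_cons]
    simp [h26, hs]
    ring
  | case5 total ks stk h26 row col rest hs ih =>
    rw [ih]
    simp only [List.map_cons, List.sum_cons, cspBin_cons]
    simp [h26, hs]

theorem alt_eq_bin (kings : List (Option Int × Option Int)) (spaces : List (Int × Int)) :
    count_safe_placements_alt kings spaces = cspBin kings spaces := by
  rw [count_safe_placements_alt, stackRun_eq]; simp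

theorem cspLoop_shift (kings : List (Option Int × Option Int)) (acc : Int)
    (spaces : List (Int × Int)) :
    cspLoop kings acc spaces = acc + cspLoop kings 0 spaces := by
  induction spaces generalizing acc with
  | nil => simp [cspLoop]
  | cons h rest ih =>
    obtain ⟨row, col⟩ := h
    rw [cspLoop, cspLoop]
    split
    · rw [ih, ih (0 + _)]; ring
    · rw [ih, ih 0]

theorem key (spaces : List (Int × Int)) (kings : List (Option Int × Option Int)) :
    count_safe_placements kings spaces = cspBin kings spaces := by
  induction spaces generalizing kings with
  | nil =>
    rw [count_safe_placements.eq_def, cspBin.eq_def]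
    split <;> simp [cspLoop]
  | cons h rest ih =>
    obtain ⟨row, col⟩ := h
    rw [count_safe_placements.eq_def, cspBin.eq_def]
    by_cases hlen : (kings.length == 26) = true
    · rw [if_pos hlen, if_pos hlen]
    · rw [if_neg hlen, if_neg hlen]
      have hrest : cspLoop kings 0 rest = count_safe_placements kings rest := by
        rw [count_safe_placements, if_neg hlen]
      by_cases hs : is_safe kings row col = true
      · simp only [hs, if_true]
        rw [cspLoop, if_pos hs, cspLoop_shift, hrest, ih, ih]
        ring
      · simp only [hs, Bool.false_eq_true, if_false]
        rw [cspLoop, if_neg hs, hrest, ih]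
        omega

-- ===== VERDICT (by name: the statement is the Claim_ definition above) =====
theorem count_safe_placements_spec : Claim_equal_count_safe_placements := by
  intro kings spaces _
  unfold Spec_count_safe_placements
  rw [alt_eq_bin]
  exact key spaces kings
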